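-- pv_equiv track=rewrite | github.com/holly/urlookup | lib/urlookup/__init__.py | is_wordpress_site
-- ===== SOURCE A (Python) =====
-- def is_wordpress_site(html):
--     patterns = [
--         "_wpemojiSettings",
--         "/xmlrpc.php?rsd",
--         "name=\"generator\" content=\"WordPress",
--         "https://api.w.org/",
--         "/wp-json",
--         "/wp-content",
--         "/wp-includes",
--         "class=\"wp-image-",
--         "class=\"wp-caption",
--         "class=\"wp-block",
--         "wp-block-library-css"
--     ]
--     for pattern in patterns:
--         if pattern in html:
--             return True
--
--     return False
-- ===== SOURCE B (Python) =====
-- import re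
--
-- _WP_PATTERNS = [
--     "_wpemojiSettings",
--     "/xmlrpc.php?rsd",
--     "name=\"generator\" content=\"WordPress",
--     "https://api.w.org/",
--     "/wp-json",
--     "/wp-content",
--     "/wp-includes",
--     "class=\"wp-image-",
--     "class=\"wp-caption",
--     "class=\"wp-block",
--     "wp-block-library-css",
-- ]
--
-- _WP_RX = re.compile("|".join(re.escape(p) for p in _WP_PATTERNS))
--
--
-- def is_wordpress_site(html):
--     return bool(_WP_RX.search(html))
-- ===== Notes on version B (the rewrite author's own statement) =====
-- stated objective: idiomatic
-- what changed: B replaces the per-pattern loop of 11 separate substring scans with one precompiled regex that alternates all escaped markers, doing a single left-to-right search over the html.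
import Mathlib
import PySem

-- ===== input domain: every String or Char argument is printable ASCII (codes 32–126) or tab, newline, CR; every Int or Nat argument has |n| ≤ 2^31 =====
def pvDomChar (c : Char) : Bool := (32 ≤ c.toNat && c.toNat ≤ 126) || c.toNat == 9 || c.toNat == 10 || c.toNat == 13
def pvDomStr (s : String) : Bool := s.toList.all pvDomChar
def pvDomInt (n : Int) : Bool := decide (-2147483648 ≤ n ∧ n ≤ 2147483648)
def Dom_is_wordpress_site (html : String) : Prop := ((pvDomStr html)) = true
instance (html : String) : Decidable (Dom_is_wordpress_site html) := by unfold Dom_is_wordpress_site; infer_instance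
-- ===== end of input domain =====

-- B replaces A's per-pattern loop of 11 separate substring scans by one combined
-- left-to-right search (a single regex alternating all escaped literal markers in Python;
-- ported as the position scan that alternation of literals performs).

-- ===== PORT A =====
-- the literal WordPress marker list of A
def wpPatterns : List String :=
  [ "_wpemojiSettings",
    "/xmlrpc.php?rsd",
    "name=\"generator\" content=\"WordPress",
    "https://api.w.org/",
    "/wp-json",
    "/wp-content",
    "/wp-includes",
    "class=\"wp-image-",
    "class=\"wp-caption",
    "class=\"wp-block",
    "wp-block-library-css" ]

-- A's loop: 'for pattern in patterns: if pattern in html: return True' / 'return False'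
def wpLoop (html : String) : List String → Bool
  | [] => false
  | p :: rest => if PySem.Str.isIn p html then true else wpLoop html rest

def is_wordpress_site (html : String) : Bool := wpLoop html wpPatterns

-- ===== PORT B =====
-- the same markers, as character lists (re.escape keeps each a literal alternative)
def wpPatternsChars : List (List Char) := wpPatterns.map String.toList

-- one attempt of the literal-alternation regex at the current position
def wpMatchAt (s : List Char) : Bool := wpPatternsChars.any (fun p => p.isPrefixOf s)

-- the regex engine's search: try each position left to right, one pass over the text
def wpSearch : List Char → Bool
  | [] => wpMatchAt []
  | c :: rest => wpMatchAt (c :: rest) || wpSearch rest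

def is_wordpress_site_alt (html : String) : Bool := wpSearch html.toList

-- ===== PRECONDITION & SPEC =====
def Spec_is_wordpress_site (html : String) (out : Bool) : Prop := out = is_wordpress_site_alt html
instance (html : String) (out : Bool) : Decidable (Spec_is_wordpress_site html out) := by unfold Spec_is_wordpress_site; infer_instance

-- ===== CLAIM (what is proved, stated in full; the proofs are below) =====
def Claim_equal_is_wordpress_site : Prop := ∀ (html : String), Dom_is_wordpress_site html → Spec_is_wordpress_site html (is_wordpress_site html)

-- ===== LEMMAS AND PROOFS =====

theorem wpLoop_iff (html : String) (pats : List String) :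
    wpLoop html pats = true ↔ ∃ p ∈ pats, p.toList <:+: html.toList := by
  induction pats with
  | nil => simp [wpLoop]
  | cons p rest ih =>
    by_cases h : p.toList <:+: html.toList
    · simp [wpLoop, (PySem.Chars.isIn_iff_infix _ _).mpr h, h]
    · have hf : PySem.Chars.isIn p.toList html.toList = false :=
        (PySem.Chars.isIn_eq_false_iff _ _).mpr h
      simp [wpLoop, hf, ih, h]

theorem wpMatchAt_iff (s : List Char) :
    wpMatchAt s = true ↔ ∃ p ∈ wpPatternsChars, p <+: s := by
  simp [wpMatchAt, List.any_eq_true, List.isPrefixOf_iff_prefix]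

theorem wpSearch_iff (s : List Char) :
    wpSearch s = true ↔ ∃ p ∈ wpPatternsChars, p <:+: s := by
  induction s with
  | nil =>
    simp [wpSearch, wpMatchAt_iff]
  | cons c rest ih =>
    simp only [wpSearch, Bool.or_eq_true, wpMatchAt_iff, ih]
    constructor
    · rintro (⟨p, hp, hpre⟩ | ⟨p, hp, hinf⟩)
      · exact ⟨p, hp, hpre.isInfix⟩
      · exact ⟨p, hp, hinf.trans (List.suffix_cons c rest).isInfix⟩
    · rintro ⟨p, hp, hinf⟩
      rcases (List.infix_cons_iff).mp hinf with h | h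
      · exact Or.inl ⟨p, hp, h⟩
      · exact Or.inr ⟨p, hp, h⟩

-- ===== VERDICT (by name: the statement is the Claim_ definition above) =====
theorem is_wordpress_site_spec : Claim_equal_is_wordpress_site := by
  intro html _
  unfold Spec_is_wordpress_site is_wordpress_site is_wordpress_site_alt
  rw [Bool.eq_iff_iff, wpLoop_iff, wpSearch_iff]
  simp [wpPatternsChars]
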